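-- pv_equiv track=rewrite | github.com/OxQuasar/nous-memories | iching/relations/f4_rigidity.py | f4_complement_pairs
-- ===== SOURCE A (Python) =====
-- from itertools import product as iterproduct, permutations
--
-- F4_ADD = [
--     [0, 1, 2, 3],
--     [1, 0, 3, 2],
--     [2, 3, 0, 1],
--     [3, 2, 1, 0],
-- ]
--
-- def f4_add(a, b): return F4_ADD[a][b]
--
-- def f4v_add(u, v):    return (f4_add(u[0], v[0]), f4_add(u[1], v[1]))
--
-- def f4_complement_pairs(a):
--     """Complement pairs {x, x+a} in F₄²."""
--     all_elems = list(iterproduct(range(4), repeat=2))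
--     seen = set()
--     pairs = []
--     for x in all_elems:
--         if x in seen: continue
--         partner = f4v_add(x, a)
--         seen.add(x); seen.add(partner)
--         pairs.append((x, partner))
--     return pairs
-- ===== SOURCE B (Python) =====
-- from itertools import product as iterproduct
--
-- F4_ADD = [
--     [0, 1, 2, 3],
--     [1, 0, 3, 2],
--     [2, 3, 0, 1],
--     [3, 2, 1, 0],
-- ]
--
-- def f4_complement_pairs(a):
--     """Complement pairs {x, x+a} in F4^2: keep x exactly when it is the
--     canonical (first-enumerated, i.e. lexicographically smallest) member of
--     its pair {x, x+a} -- no `seen` bookkeeping needed."""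
--     pairs = []
--     for x in iterproduct(range(4), repeat=2):
--         partner = (F4_ADD[x[0]][a[0]], F4_ADD[x[1]][a[1]])
--         if x <= partner:
--             pairs.append((x, partner))
--     return pairs
-- ===== Notes on version B (the rewrite author's own statement) =====
-- stated objective: simpler
-- what changed: Replaces the mutable `seen`-set bookkeeping with a stateless canonical-representative test: emit (x, x+a) exactly when x is lexicographically <= its partner, which holds iff x was not produced as the partner of an earlier element (adding a is an involution).
import Mathlib
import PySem

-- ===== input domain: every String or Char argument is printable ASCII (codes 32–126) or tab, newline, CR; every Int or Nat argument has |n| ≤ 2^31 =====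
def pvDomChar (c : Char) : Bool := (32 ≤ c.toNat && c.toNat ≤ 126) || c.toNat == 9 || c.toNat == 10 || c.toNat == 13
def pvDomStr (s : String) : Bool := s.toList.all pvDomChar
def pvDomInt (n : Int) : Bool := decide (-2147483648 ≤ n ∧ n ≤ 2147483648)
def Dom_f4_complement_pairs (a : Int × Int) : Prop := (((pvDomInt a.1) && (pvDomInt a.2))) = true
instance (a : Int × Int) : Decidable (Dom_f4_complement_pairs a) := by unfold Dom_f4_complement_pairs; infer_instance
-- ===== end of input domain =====

-- B drops A's mutable `seen` set in favour of a stateless lexicographic canonical-representative test; equal return values proved on all a with in-range components (both raise IndexError otherwise).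

-- ===== PORT A =====
def pvF4ADD : List (List Int) := [[0, 1, 2, 3], [1, 0, 3, 2], [2, 3, 0, 1], [3, 2, 1, 0]]

-- F4_ADD[a][b]; total form via getD — Pre_ restricts to where Python's lookup succeeds
def pvF4add (a b : Int) : Int := PySem.List.pyGetD (PySem.List.pyGetD pvF4ADD a []) b 0

def pvF4vAdd (u v : Int × Int) : Int × Int := (pvF4add u.1 v.1, pvF4add u.2 v.2)

-- list(iterproduct(range(4), repeat=2))
def pvAllElems : List (Int × Int) :=
  (PySem.List.pyRange 0 4 1).flatMap (fun i => (PySem.List.pyRange 0 4 1).map (fun j => (i, j)))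

def f4_complement_pairs (a : Int × Int) : List ((Int × Int) × (Int × Int)) :=
  (pvAllElems.foldl
    (fun (st : PySem.Set (Int × Int) × List ((Int × Int) × (Int × Int))) x =>
      if x ∈ st.1 then st
      else
        let partner := pvF4vAdd x a
        (PySem.Set.add (PySem.Set.add st.1 x) partner, st.2 ++ [(x, partner)]))
    (PySem.Set.empty, [])).2

-- ===== PORT B =====
def f4_complement_pairs_alt (a : Int × Int) : List ((Int × Int) × (Int × Int)) :=
  pvAllElems.foldl
    (fun pairs x =>
      let partner := (pvF4add x.1 a.1, pvF4add x.2 a.2)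
      if x.1 < partner.1 ∨ (x.1 = partner.1 ∧ x.2 ≤ partner.2) then pairs ++ [(x, partner)]
      else pairs)
    []

-- ===== PRECONDITION & SPEC =====
-- Pre_: both components of a index the 4-column F4_ADD rows (Python allows -4..3 via negative-index wrap); outside this, A raises IndexError (and so does B).
def Pre_f4_complement_pairs (a : Int × Int) : Prop :=
  (-4 ≤ a.1 ∧ a.1 ≤ 3) ∧ (-4 ≤ a.2 ∧ a.2 ≤ 3)
instance (a : Int × Int) : Decidable (Pre_f4_complement_pairs a) := by
  unfold Pre_f4_complement_pairs; infer_instance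

def pvWitness_f4_complement_pairs : (Int × Int) := (1, 2)

def Spec_f4_complement_pairs (a : Int × Int) (out : List ((Int × Int) × (Int × Int))) : Prop := out = f4_complement_pairs_alt a
instance (a : Int × Int) (out : List ((Int × Int) × (Int × Int))) : Decidable (Spec_f4_complement_pairs a out) := by unfold Spec_f4_complement_pairs; infer_instance

-- ===== CLAIM (what is proved, stated in full; the proofs are below) =====
def Claim_equal_f4_complement_pairs : Prop := ∀ (a : Int × Int), Dom_f4_complement_pairs a → Pre_f4_complement_pairs a → Spec_f4_complement_pairs a (f4_complement_pairs a)

-- ===== LEMMAS AND PROOFS =====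

-- ===== VERDICT (by name: the statement is the Claim_ definition above) =====
theorem f4_complement_pairs_spec : Claim_equal_f4_complement_pairs := by
  intro a _ hpre
  obtain ⟨a1, a2⟩ := a
  obtain ⟨⟨h1l, h1u⟩, ⟨h2l, h2u⟩⟩ := hpre
  unfold Spec_f4_complement_pairs
  interval_cases a1 <;> interval_cases a2 <;> decide
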